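-- pv_equiv track=rewrite | github.com/pypi-data/pypi-code-104 | arez/aRez-0.2.3-py3-none-any.whl/utils.py | _convert_map_name
-- ===== SOURCE A (Python) =====
-- def _convert_map_name(map_name: str) -> str:
--     """
--     Converts the map name, removing the unneeded prefixes.
--
--     Parameters
--     ----------
--     map_name : str
--         The string representing the map name.
--
--     Returns
--     -------
--     str
--         The converted map name.
--     """
--     map_name = map_name.strip()
--     for prefix in ("LIVE", "Ranked", "Practice", "WIP"):  # pragma: no branch
--         if map_name.startswith(prefix):
--             map_name = map_name[len(prefix):]
--             break
--     for suffix in ("(Siege)", "(Onslaught)", "(TDM)", "(KOTH)"):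
--         if map_name.endswith(suffix):
--             map_name = map_name[:-len(suffix)]
--             break
--     return map_name.strip()
-- ===== SOURCE B (Python) =====
-- # Different strategy: a single generic matcher that walks the characters once,
-- # progressively narrowing the set of live candidates (an on-the-fly trie walk),
-- # instead of A's per-candidate startswith/endswith scans with a break.
-- _PREFIXES = ("LIVE", "Ranked", "Practice", "WIP")
-- _SUFFIXES = ("(Siege)", "(Onslaught)", "(TDM)", "(KOTH)")
--
--
-- def _match_len(candidates, chars, n=0):
--     # Length of the candidate matched at the front of `chars` (0 if none):
--     # at step n only candidates agreeing with chars[:n] survive, each with its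
--     # first n characters consumed; an emptied candidate has fully matched.
--     if not candidates:
--         return 0
--     if any(c == "" for c in candidates):
--         return n
--     if not chars:
--         return 0
--     ch = chars[0]
--     return _match_len([c[1:] for c in candidates if c[0] == ch], chars[1:], n + 1)
--
--
-- def _convert_map_name(map_name: str) -> str:
--     s = map_name.strip()
--     s = s[_match_len(list(_PREFIXES), s):]
--     m = _match_len([w[::-1] for w in _SUFFIXES], s[::-1])
--     return s[:len(s) - m].strip()
-- ===== Notes on version B (the rewrite author's own statement) =====
-- stated objective: alternative
-- what changed: A's two candidate-by-candidate scans (startswith/endswith tried in order with a break, then a slice) are replaced by one generic recursive matcher that walks the characters left to right, progressively narrowing the live candidate set (an on-the-fly trie walk) and returning the matched length, which then drives a single slice; the suffix pass reuses the same matcher on the reversed string.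
import Mathlib
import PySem

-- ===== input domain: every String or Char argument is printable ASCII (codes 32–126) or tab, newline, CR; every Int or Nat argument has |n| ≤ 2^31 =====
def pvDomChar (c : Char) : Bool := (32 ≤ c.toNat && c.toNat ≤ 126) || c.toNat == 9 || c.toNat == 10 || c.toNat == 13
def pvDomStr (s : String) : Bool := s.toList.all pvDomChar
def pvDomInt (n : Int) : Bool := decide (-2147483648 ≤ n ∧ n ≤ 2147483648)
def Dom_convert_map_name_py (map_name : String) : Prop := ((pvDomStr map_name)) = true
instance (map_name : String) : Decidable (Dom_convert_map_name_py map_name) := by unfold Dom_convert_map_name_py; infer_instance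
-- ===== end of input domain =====

-- B replaces A's per-candidate startswith/endswith scans by one generic recursive matcher
-- that narrows the candidate set one character at a time (objective: alternative).

-- ===== PORT A =====
-- the 'for prefix in (…): if map_name.startswith(prefix): map_name = map_name[len(prefix):]; break' loop
def pvStripPrefixLoop (s : String) : List String → String
  | [] => s
  | p :: rest =>
    if PySem.Str.startswith s p then PySem.Str.slice s (some (PySem.Str.len p)) none
    else pvStripPrefixLoop s rest

-- the 'for suffix in (…): if map_name.endswith(suffix): map_name = map_name[:-len(suffix)]; break' loop
def pvStripSuffixLoop (s : String) : List String → String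
  | [] => s
  | w :: rest =>
    if PySem.Str.endswith s w then PySem.Str.slice s none (some (-(PySem.Str.len w)))
    else pvStripSuffixLoop s rest

def convert_map_name_py (map_name : String) : String :=
  let s1 := PySem.Str.strip map_name
  let s2 := pvStripPrefixLoop s1 ["LIVE", "Ranked", "Practice", "WIP"]
  let s3 := pvStripSuffixLoop s2 ["(Siege)", "(Onslaught)", "(TDM)", "(KOTH)"]
  PySem.Str.strip s3

-- ===== PORT B =====
-- '[c[1:] for c in candidates if c[0] == ch]' (no candidate is empty when this runs)
def pvFilterStep (c : Char) (cands : List (List Char)) : List (List Char) :=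
  cands.filterMap (fun w => match w with
    | [] => none
    | c₀ :: t => if c₀ = c then some t else none)

-- B's _match_len: progressive candidate filtering, one pass over the characters
def pvMatchLen (cands : List (List Char)) (cs : List Char) (n : Nat) : Nat :=
  if cands.isEmpty then 0
  else if [] ∈ cands then n
  else match cs with
    | [] => 0
    | c :: rest => pvMatchLen (pvFilterStep c cands) rest (n + 1)

def convert_map_name_py_alt (map_name : String) : String :=
  let s0 := PySem.Str.strip map_name
  let s := PySem.Str.slice s0
    (some ((pvMatchLen (["LIVE", "Ranked", "Practice", "WIP"].map String.toList) s0.toList 0 : Nat) : Int)) none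
  -- s[::-1] is the reverse of the code points: exact by PySem.Str.slice?_none_none_neg_one
  let m := pvMatchLen (["(Siege)", "(Onslaught)", "(TDM)", "(KOTH)"].map (fun w => w.toList.reverse))
    s.toList.reverse 0
  PySem.Str.strip (PySem.Str.slice s none (some (PySem.Str.len s - (m : Int))))

-- ===== PRECONDITION & SPEC =====
def Spec_convert_map_name_py (map_name : String) (out : String) : Prop := out = convert_map_name_py_alt map_name
instance (map_name : String) (out : String) : Decidable (Spec_convert_map_name_py map_name out) := by unfold Spec_convert_map_name_py; infer_instance

-- ===== CLAIM (what is proved, stated in full; the proofs are below) =====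
def Claim_equal_convert_map_name_py : Prop := ∀ (map_name : String), Dom_convert_map_name_py map_name → Spec_convert_map_name_py map_name (convert_map_name_py map_name)

-- ===== LEMMAS AND PROOFS =====

-- pairwise prefix-freeness: what makes "the first completed candidate" well defined
def pvPF (cands : List (List Char)) : Prop :=
  cands.Pairwise (fun a b => ¬ a <+: b ∧ ¬ b <+: a)

theorem pvPF_singleton_of_nil_mem (cands : List (List Char)) (hpf : pvPF cands)
    (h : ([] : List Char) ∈ cands) : cands = [[]] := by
  cases cands with
  | nil => cases h
  | cons a l =>
    rcases List.pairwise_cons.mp hpf with ⟨hrel, htail⟩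
    rcases List.mem_cons.mp h with rfl | hmem
    · cases l with
      | nil => rfl
      | cons b m => exact absurd (List.nil_prefix) (hrel b (List.mem_cons_self)).1
    · exact absurd (List.nil_prefix) (hrel [] hmem).2

theorem pvPF_filterStep (c : Char) (cands : List (List Char)) (hpf : pvPF cands) :
    pvPF (pvFilterStep c cands) := by
  unfold pvPF pvFilterStep
  rw [List.pairwise_filterMap]
  refine hpf.imp ?_
  rintro a b ⟨hab, hba⟩ x hx y hy
  cases a with
  | nil => simp at hx
  | cons c₀ t =>
    cases b with
    | nil => simp at hy
    | cons c₁ u =>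
      simp only [Option.mem_def] at hx hy
      split_ifs at hx hy with h1 h2
      · cases hx; cases hy; subst h1; subst h2
        constructor
        · intro hp; exact hab (List.cons_prefix_cons.mpr ⟨rfl, hp⟩)
        · intro hp; exact hba (List.cons_prefix_cons.mpr ⟨rfl, hp⟩)

theorem pvFilterStep_find (c : Char) (rest : List Char) (n : Nat) (cands : List (List Char))
    (h : ([] : List Char) ∉ cands) :
    (match (pvFilterStep c cands).find? (fun w => decide (w <+: rest)) with
      | some w => n + 1 + w.length | none => 0)
    = (match cands.find? (fun w => decide (w <+: c :: rest)) with
      | some w => n + w.length | none => 0) := by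
  induction cands with
  | nil => rfl
  | cons a l ih =>
    have ha : a ≠ [] := fun he => h (he ▸ List.mem_cons_self)
    have hl : ([] : List Char) ∉ l := fun hm => h (List.mem_cons_of_mem _ hm)
    cases a with
    | nil => exact absurd rfl ha
    | cons c₀ t =>
      by_cases hc : c₀ = c
      · subst hc
        have hstep : pvFilterStep c₀ ((c₀ :: t) :: l) = t :: pvFilterStep c₀ l := by
          simp [pvFilterStep]
        rw [hstep]
        by_cases hp : t <+: rest
        · rw [List.find?_cons_of_pos (by simpa using hp),
            List.find?_cons_of_pos (by simp [List.cons_prefix_cons, hp])]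
          show n + 1 + t.length = n + (t.length + 1)
          omega
        · rw [List.find?_cons_of_neg (by simpa using hp),
            List.find?_cons_of_neg (by simp [List.cons_prefix_cons, hp])]
          exact ih hl
      · have hstep : pvFilterStep c ((c₀ :: t) :: l) = pvFilterStep c l := by
          simp [pvFilterStep, hc]
        rw [hstep, List.find?_cons_of_neg (by simp [List.cons_prefix_cons, hc])]
        exact ih hl

theorem pvMatchLen_eq_find (cs : List Char) (cands : List (List Char)) (n : Nat)
    (hpf : pvPF cands) :
    pvMatchLen cands cs n
    = (match cands.find? (fun w => decide (w <+: cs)) with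
      | some w => n + w.length | none => 0) := by
  induction cs generalizing cands n with
  | nil =>
    rw [pvMatchLen]
    by_cases he : cands.isEmpty
    · rw [if_pos he, List.isEmpty_iff.mp he]
      rfl
    · rw [if_neg he]
      by_cases hnil : ([] : List Char) ∈ cands
      · rw [if_pos hnil, pvPF_singleton_of_nil_mem cands hpf hnil]
        rfl
      · rw [if_neg hnil, List.find?_eq_none.mpr]
        intro x hx
        simp only [decide_eq_true_eq, List.prefix_nil]
        exact fun he' => hnil (he' ▸ hx)
  | cons c rest ih =>
    rw [pvMatchLen]
    by_cases he : cands.isEmpty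
    · rw [if_pos he, List.isEmpty_iff.mp he]
      rfl
    · rw [if_neg he]
      by_cases hnil : ([] : List Char) ∈ cands
      · rw [if_pos hnil, pvPF_singleton_of_nil_mem cands hpf hnil]
        rfl
      · rw [if_neg hnil, ih (pvFilterStep c cands) (n + 1) (pvPF_filterStep c cands hpf),
          pvFilterStep_find c rest n cands hnil]

theorem pv_stage1 (t : String) :
    pvStripPrefixLoop t ["LIVE", "Ranked", "Practice", "WIP"]
    = PySem.Str.slice t
        (some ((pvMatchLen (["LIVE", "Ranked", "Practice", "WIP"].map String.toList) t.toList 0 : Nat) : Int)) none := by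
  have hpf : pvPF (["LIVE", "Ranked", "Practice", "WIP"].map String.toList) := by
    unfold pvPF; decide
  have hml := pvMatchLen_eq_find t.toList (["LIVE", "Ranked", "Practice", "WIP"].map String.toList) 0 hpf
  simp only [List.map_cons, List.map_nil] at hml ⊢
  by_cases h1 : "LIVE".toList <+: t.toList
  · have hb : PySem.Str.startswith t "LIVE" = true := by
      simp only [PySem.Str.startswith_eq]
      exact (PySem.Chars.startswith_iff _ _).mpr h1
    rw [List.find?_cons_of_pos (by simpa using h1)] at hml
    simp only [pvStripPrefixLoop, hb, if_true]
    rw [hml]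
    congr 1
  · have hb : PySem.Str.startswith t "LIVE" = false := by
      rw [PySem.Str.startswith_eq, Bool.eq_false_iff]
      intro hc; exact h1 (by simpa using (PySem.Chars.startswith_iff _ _).mp hc)
    rw [List.find?_cons_of_neg (by simpa using h1)] at hml
    simp only [pvStripPrefixLoop, hb, Bool.false_eq_true, if_false]
    by_cases h2 : "Ranked".toList <+: t.toList
    · have hb2 : PySem.Str.startswith t "Ranked" = true := by
        simp only [PySem.Str.startswith_eq]
        exact (PySem.Chars.startswith_iff _ _).mpr h2
      rw [List.find?_cons_of_pos (by simpa using h2)] at hml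
      simp only [hb2, if_true]
      rw [hml]
      congr 1
    · have hb2 : PySem.Str.startswith t "Ranked" = false := by
        rw [PySem.Str.startswith_eq, Bool.eq_false_iff]
        intro hc; exact h2 (by simpa using (PySem.Chars.startswith_iff _ _).mp hc)
      rw [List.find?_cons_of_neg (by simpa using h2)] at hml
      simp only [hb2, Bool.false_eq_true, if_false]
      by_cases h3 : "Practice".toList <+: t.toList
      · have hb3 : PySem.Str.startswith t "Practice" = true := by
          simp only [PySem.Str.startswith_eq]
          exact (PySem.Chars.startswith_iff _ _).mpr h3
        rw [List.find?_cons_of_pos (by simpa using h3)] at hml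
        simp only [hb3, if_true]
        rw [hml]
        congr 1
      · have hb3 : PySem.Str.startswith t "Practice" = false := by
          rw [PySem.Str.startswith_eq, Bool.eq_false_iff]
          intro hc; exact h3 (by simpa using (PySem.Chars.startswith_iff _ _).mp hc)
        rw [List.find?_cons_of_neg (by simpa using h3)] at hml
        simp only [hb3, Bool.false_eq_true, if_false]
        by_cases h4 : "WIP".toList <+: t.toList
        · have hb4 : PySem.Str.startswith t "WIP" = true := by
            simp only [PySem.Str.startswith_eq]
            exact (PySem.Chars.startswith_iff _ _).mpr h4
          rw [List.find?_cons_of_pos (by simpa using h4)] at hml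
          simp only [hb4, if_true]
          rw [hml]
          congr 1
        · have hb4 : PySem.Str.startswith t "WIP" = false := by
            rw [PySem.Str.startswith_eq, Bool.eq_false_iff]
            intro hc; exact h4 (by simpa using (PySem.Chars.startswith_iff _ _).mp hc)
          rw [List.find?_cons_of_neg (by simpa using h4)] at hml
          simp only [hb4, Bool.false_eq_true, if_false, List.find?_nil] at hml ⊢
          rw [hml]
          apply String.toList_inj.mp
          simp [PySem.Str.toList_slice, PySem.Chars.slice_eq_listSlice]

theorem pv_stage2 (t : String) :
    pvStripSuffixLoop t ["(Siege)", "(Onslaught)", "(TDM)", "(KOTH)"]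
    = PySem.Str.slice t none
        (some (PySem.Str.len t -
          ((pvMatchLen (["(Siege)", "(Onslaught)", "(TDM)", "(KOTH)"].map (fun w => w.toList.reverse))
            t.toList.reverse 0 : Nat) : Int))) := by
  have hpf : pvPF (["(Siege)", "(Onslaught)", "(TDM)", "(KOTH)"].map (fun w => w.toList.reverse)) := by
    unfold pvPF; decide
  have hml := pvMatchLen_eq_find t.toList.reverse (["(Siege)", "(Onslaught)", "(TDM)", "(KOTH)"].map (fun w => w.toList.reverse)) 0 hpf
  simp only [List.map_cons, List.map_nil] at hml ⊢
  simp only [pvStripSuffixLoop]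
  by_cases h1 : "(Siege)".toList <:+ t.toList
  · have hb1 : PySem.Str.endswith t "(Siege)" = true := by
      simp only [PySem.Str.endswith_eq]
      exact (PySem.Chars.endswith_iff _ _).mpr h1
    rw [List.find?_cons_of_pos (by simpa using List.reverse_prefix.mpr h1)] at hml
    have hv : pvMatchLen ["(Siege)".toList.reverse, "(Onslaught)".toList.reverse, "(TDM)".toList.reverse, "(KOTH)".toList.reverse] t.toList.reverse 0 = (7 : Nat) := by rw [hml]; decide
    simp only [hb1, if_true]
    rw [hv]
    apply String.toList_inj.mp
    simp only [PySem.Str.toList_slice, PySem.Chars.slice_eq_listSlice]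
    have hlen : (7:Nat) ≤ t.toList.length := by simpa using h1.length_le
    rw [show (-(PySem.Str.len "(Siege)")) = (-(7:Int)) by decide]
    rw [PySem.List.slice_to_neg_ofNat t.toList 7 (by omega)]
    rw [PySem.Str.len_eq]
    rw [show ((t.toList.length : Int) - ((7:Nat) : Int)) = ((t.toList.length - 7 : Nat) : Int) by omega]
    rw [PySem.List.slice_to_natCast]
  · have hb1 : PySem.Str.endswith t "(Siege)" = false := by
      rw [PySem.Str.endswith_eq, Bool.eq_false_iff]
      intro hc; exact h1 (by simpa using (PySem.Chars.endswith_iff _ _).mp hc)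
    rw [List.find?_cons_of_neg (by simp; intro hc; exact h1 (List.reverse_prefix.mp (by simpa using hc)))] at hml
    simp only [hb1, Bool.false_eq_true, if_false]
    by_cases h2 : "(Onslaught)".toList <:+ t.toList
    · have hb2 : PySem.Str.endswith t "(Onslaught)" = true := by
        simp only [PySem.Str.endswith_eq]
        exact (PySem.Chars.endswith_iff _ _).mpr h2
      rw [List.find?_cons_of_pos (by simpa using List.reverse_prefix.mpr h2)] at hml
      have hv : pvMatchLen ["(Siege)".toList.reverse, "(Onslaught)".toList.reverse, "(TDM)".toList.reverse, "(KOTH)".toList.reverse] t.toList.reverse 0 = (11 : Nat) := by rw [hml]; decide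
      simp only [hb2, if_true]
      rw [hv]
      apply String.toList_inj.mp
      simp only [PySem.Str.toList_slice, PySem.Chars.slice_eq_listSlice]
      have hlen : (11:Nat) ≤ t.toList.length := by simpa using h2.length_le
      rw [show (-(PySem.Str.len "(Onslaught)")) = (-(11:Int)) by decide]
      rw [PySem.List.slice_to_neg_ofNat t.toList 11 (by omega)]
      rw [PySem.Str.len_eq]
      rw [show ((t.toList.length : Int) - ((11:Nat) : Int)) = ((t.toList.length - 11 : Nat) : Int) by omega]
      rw [PySem.List.slice_to_natCast]
    · have hb2 : PySem.Str.endswith t "(Onslaught)" = false := by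
        rw [PySem.Str.endswith_eq, Bool.eq_false_iff]
        intro hc; exact h2 (by simpa using (PySem.Chars.endswith_iff _ _).mp hc)
      rw [List.find?_cons_of_neg (by simp; intro hc; exact h2 (List.reverse_prefix.mp (by simpa using hc)))] at hml
      simp only [hb2, Bool.false_eq_true, if_false]
      by_cases h3 : "(TDM)".toList <:+ t.toList
      · have hb3 : PySem.Str.endswith t "(TDM)" = true := by
          simp only [PySem.Str.endswith_eq]
          exact (PySem.Chars.endswith_iff _ _).mpr h3
        rw [List.find?_cons_of_pos (by simpa using List.reverse_prefix.mpr h3)] at hml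
        have hv : pvMatchLen ["(Siege)".toList.reverse, "(Onslaught)".toList.reverse, "(TDM)".toList.reverse, "(KOTH)".toList.reverse] t.toList.reverse 0 = (5 : Nat) := by rw [hml]; decide
        simp only [hb3, if_true]
        rw [hv]
        apply String.toList_inj.mp
        simp only [PySem.Str.toList_slice, PySem.Chars.slice_eq_listSlice]
        have hlen : (5:Nat) ≤ t.toList.length := by simpa using h3.length_le
        rw [show (-(PySem.Str.len "(TDM)")) = (-(5:Int)) by decide]
        rw [PySem.List.slice_to_neg_ofNat t.toList 5 (by omega)]
        rw [PySem.Str.len_eq]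
        rw [show ((t.toList.length : Int) - ((5:Nat) : Int)) = ((t.toList.length - 5 : Nat) : Int) by omega]
        rw [PySem.List.slice_to_natCast]
      · have hb3 : PySem.Str.endswith t "(TDM)" = false := by
          rw [PySem.Str.endswith_eq, Bool.eq_false_iff]
          intro hc; exact h3 (by simpa using (PySem.Chars.endswith_iff _ _).mp hc)
        rw [List.find?_cons_of_neg (by simp; intro hc; exact h3 (List.reverse_prefix.mp (by simpa using hc)))] at hml
        simp only [hb3, Bool.false_eq_true, if_false]
        by_cases h4 : "(KOTH)".toList <:+ t.toList
        · have hb4 : PySem.Str.endswith t "(KOTH)" = true := by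
            simp only [PySem.Str.endswith_eq]
            exact (PySem.Chars.endswith_iff _ _).mpr h4
          rw [List.find?_cons_of_pos (by simpa using List.reverse_prefix.mpr h4)] at hml
          have hv : pvMatchLen ["(Siege)".toList.reverse, "(Onslaught)".toList.reverse, "(TDM)".toList.reverse, "(KOTH)".toList.reverse] t.toList.reverse 0 = (6 : Nat) := by rw [hml]; decide
          simp only [hb4, if_true]
          rw [hv]
          apply String.toList_inj.mp
          simp only [PySem.Str.toList_slice, PySem.Chars.slice_eq_listSlice]
          have hlen : (6:Nat) ≤ t.toList.length := by simpa using h4.length_le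
          rw [show (-(PySem.Str.len "(KOTH)")) = (-(6:Int)) by decide]
          rw [PySem.List.slice_to_neg_ofNat t.toList 6 (by omega)]
          rw [PySem.Str.len_eq]
          rw [show ((t.toList.length : Int) - ((6:Nat) : Int)) = ((t.toList.length - 6 : Nat) : Int) by omega]
          rw [PySem.List.slice_to_natCast]
        · have hb4 : PySem.Str.endswith t "(KOTH)" = false := by
            rw [PySem.Str.endswith_eq, Bool.eq_false_iff]
            intro hc; exact h4 (by simpa using (PySem.Chars.endswith_iff _ _).mp hc)
          rw [List.find?_cons_of_neg (by simp; intro hc; exact h4 (List.reverse_prefix.mp (by simpa using hc)))] at hml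
          simp only [hb4, Bool.false_eq_true, if_false]
          simp only [List.find?_nil] at hml
          have hv : pvMatchLen ["(Siege)".toList.reverse, "(Onslaught)".toList.reverse, "(TDM)".toList.reverse, "(KOTH)".toList.reverse] t.toList.reverse 0 = (0 : Nat) := by rw [hml]
          rw [hv]
          apply String.toList_inj.mp
          simp only [PySem.Str.toList_slice, PySem.Chars.slice_eq_listSlice]
          rw [PySem.Str.len_eq]
          rw [show ((t.toList.length : Int) - ((0:Nat) : Int)) = ((t.toList.length : Nat) : Int) by omega]
          rw [PySem.List.slice_to_natCast]
          simp

-- ===== VERDICT (by name: the statement is the Claim_ definition above) =====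
theorem convert_map_name_py_spec : Claim_equal_convert_map_name_py := by
  intro s _
  show _ = _
  simp only [convert_map_name_py, convert_map_name_py_alt]
  rw [pv_stage1, pv_stage2]
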